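-- pv_equiv track=rewrite | github.com/JAMelendezD/Tutorial | dynamic.py | largest_chain
-- ===== SOURCE A (Python) =====
-- def largest_chain(threshold):
--     '''
--     Calculates the largest Collatz chain up to a threshold
--     '''
--     largest = 0 # Assume the largest is 0
--     for i in range(1, threshold): # Go over all numbers up to the threshold (naive no recursion)
--         n = i
--         size = 0
--         while n != 1:
--             if n % 2 == 0:
--                 n  = n // 2
--             else:
--                 n = 3 * n + 1
--             size += 1
--         if size > largest: # we found even a larger one
--             largest = size # modify largest to this larger one
--             target = i # change the target to the number that seems to have the largest one
--     return target
-- ===== SOURCE B (Python) =====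
-- def largest_chain(threshold):
--     '''
--     Calculates the largest Collatz chain up to a threshold,
--     memoizing chain lengths (dynamic programming): numbers are
--     processed in increasing order, so each walk only has to run
--     until it drops below its start, where the length is cached.
--     '''
--     lengths = {1: 0}
--     best = 0
--     target = None
--     for i in range(2, threshold):
--         n = i
--         steps = 0
--         while n >= i:
--             n = n // 2 if n % 2 == 0 else 3 * n + 1
--             steps += 1
--         size = steps + lengths[n]
--         lengths[i] = size
--         if size > best:
--             best = size
--             target = i
--     return target
-- ===== Notes on version B (the rewrite author's own statement) =====
-- stated objective: faster
-- what changed: Replaces the naive full Collatz walk per number with dynamic programming: numbers are processed in increasing order and each walk only runs until it drops below its start value, where the chain length is already cached in a dict.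
-- outside the precondition, e.g. on largest_chain(2): A raises UnboundLocalError, B returns None
import Mathlib
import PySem

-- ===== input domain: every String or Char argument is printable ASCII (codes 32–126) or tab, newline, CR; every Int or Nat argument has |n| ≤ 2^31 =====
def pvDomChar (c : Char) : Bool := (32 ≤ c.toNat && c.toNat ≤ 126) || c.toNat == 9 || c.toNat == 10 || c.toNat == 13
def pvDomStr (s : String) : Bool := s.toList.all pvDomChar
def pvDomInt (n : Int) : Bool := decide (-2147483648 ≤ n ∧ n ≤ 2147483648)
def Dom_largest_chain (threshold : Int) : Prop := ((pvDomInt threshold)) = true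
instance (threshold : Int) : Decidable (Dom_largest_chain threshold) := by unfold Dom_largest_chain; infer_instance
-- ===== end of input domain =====

-- B replaces A's naive full Collatz walk per number by an ascending memoized DP; measured faster.
-- Both while-loops are ported with a fuel bound pvFuel (they are unbounded in Python; fuel
-- exhaustion is unreachable on the tested domain, where chains are far shorter than pvFuel).

-- ===== PORT A =====
-- one Collatz step: n//2 if n even else 3n+1 (this expression appears verbatim in both Pythons)
def pvStep (n : Int) : Int :=
  if PySem.Int.mod n 2 = 0 then PySem.Int.floordiv n 2 else 3 * n + 1

def pvFuel : Nat := 10000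

-- A's inner 'while n != 1' loop: number of steps to reach 1 (none = fuel out, where Python diverges)
def chainLen (fuel : Nat) (n : Int) : Option Int :=
  if n = 1 then some 0
  else match fuel with
    | 0 => none
    | f + 1 => (chainLen f (pvStep n)).map (· + 1)

-- A's loop body: compute the chain length of i naively, keep it if it beats the best so far
def stepA (st : Int × Option Int) (i : Int) : Int × Option Int :=
  let size := (chainLen pvFuel i).getD 0
  if size > st.1 then (size, some i) else st

def largest_chain (threshold : Int) : Int :=
  (((PySem.List.pyRange 1 threshold 1).foldl stepA (0, none)).2).getD 0

-- ===== PORT B =====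
-- B's inner 'while n >= i' loop: steps taken and the first iterate below i (none = fuel out)
def walkBelow (fuel : Nat) (i n : Int) : Option (Int × Int) :=
  if n < i then some (0, n)
  else match fuel with
    | 0 => none
    | f + 1 => (walkBelow f i (pvStep n)).map (fun p => (p.1 + 1, p.2))

-- B's 'size = steps + lengths[n]': none where the Python loop would diverge (walk fuel out) or
-- raise KeyError on the memo lookup — both unreachable in the Python on terminating chains
def lengthAt? (i : Int) (d : PySem.Dict Int Int) : Option Int :=
  match walkBelow pvFuel i i with
  | none => none
  | some (steps, n) =>
    match d.get? n with
    | none => none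
    | some w => some (steps + w)

-- B's loop body: memoized size, cache write-back, best-so-far update.  The '≤ pvFuel' guard
-- only keeps the fueled port total-faithful: it can fail only past fuel exhaustion, where
-- the Python computation is not reached.
def stepB (st : (Int × Option Int) × PySem.Dict Int Int) (i : Int) :
    (Int × Option Int) × PySem.Dict Int Int :=
  match lengthAt? i st.2 with
  | some size =>
    if size ≤ (pvFuel : Int) then
      let d' := st.2.insert i size
      if size > st.1.1 then ((size, some i), d') else (st.1, d')
    else st
  | none => st

def largest_chain_alt (threshold : Int) : Int :=
  let r := (PySem.List.pyRange 2 threshold 1).foldl stepB ((0, none), (PySem.Dict.empty).insert 1 0)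
  r.1.2.getD 0

-- ===== PRECONDITION & SPEC =====
-- Python A raises UnboundLocalError ('target' is never assigned) for threshold ≤ 2: excluded.
def Pre_largest_chain (threshold : Int) : Prop := 3 ≤ threshold
instance (threshold : Int) : Decidable (Pre_largest_chain threshold) := by unfold Pre_largest_chain; infer_instance
def pvWitness_largest_chain : Int := 5

def Spec_largest_chain (threshold : Int) (out : Int) : Prop := out = largest_chain_alt threshold
instance (threshold : Int) (out : Int) : Decidable (Spec_largest_chain threshold out) := by unfold Spec_largest_chain; infer_instance

-- ===== CLAIM (what is proved, stated in full; the proofs are below) =====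
def Claim_equal_largest_chain : Prop := ∀ (threshold : Int), Dom_largest_chain threshold → Pre_largest_chain threshold → Spec_largest_chain threshold (largest_chain threshold)

-- ===== LEMMAS AND PROOFS =====

-- the cache invariant before processing index i: the cache holds exactly the true (fueled)
-- chain lengths of the numbers 1 ≤ k < i whose fueled chain terminates
def CacheInv (i : Int) (d : PySem.Dict Int Int) : Prop :=
  (∀ k v, d.get? k = some v → 1 ≤ k ∧ k < i ∧ chainLen pvFuel k = some v) ∧
  (∀ k v, 1 ≤ k → k < i → chainLen pvFuel k = some v → d.get? k = some v)

theorem chainLen_mono {f g : Nat} {n v : Int} (h : chainLen f n = some v) (hfg : f ≤ g) :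
    chainLen g n = some v := by
  induction f generalizing g n v with
  | zero =>
    unfold chainLen at h
    split at h
    · next h1 => unfold chainLen; simp [h1]; simpa using h
    · simp at h
  | succ f ih =>
    unfold chainLen at h
    split at h
    · next h1 => unfold chainLen; simp [h1]; simpa using h
    · next h1 =>
      obtain ⟨g', rfl⟩ : ∃ g', g = g' + 1 := ⟨g - 1, by omega⟩
      simp only [Option.map_eq_some_iff] at h
      obtain ⟨w, hw, rfl⟩ := h
      have := ih (g := g') hw (by omega)
      unfold chainLen
      simp [h1, this]

theorem chainLen_min {f : Nat} {n v : Int} (h : chainLen f n = some v) :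
    0 ≤ v ∧ v ≤ (f : Int) ∧ chainLen v.toNat n = some v := by
  induction f generalizing n v with
  | zero =>
    unfold chainLen at h
    split at h
    · next h1 =>
      simp at h
      subst h
      refine ⟨le_refl 0, le_refl 0, ?_⟩
      unfold chainLen; simp [h1]
    · simp at h
  | succ f ih =>
    unfold chainLen at h
    split at h
    · next h1 =>
      simp at h
      subst h
      refine ⟨le_refl 0, by positivity, ?_⟩
      unfold chainLen; simp [h1]
    · next h1 =>
      simp only [Option.map_eq_some_iff] at h
      obtain ⟨w, hw, rfl⟩ := h
      obtain ⟨h0, hle, hmin⟩ := ih hw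
      refine ⟨by omega, by push_cast; omega, ?_⟩
      have : (w + 1).toNat = w.toNat + 1 := by omega
      rw [this]
      unfold chainLen
      simp [h1, hmin]

theorem chainLen_unique {f g : Nat} {n v w : Int}
    (hv : chainLen f n = some v) (hw : chainLen g n = some w) : v = w := by
  have h1 := chainLen_mono hv (Nat.le_max_left f g)
  have h2 := chainLen_mono hw (Nat.le_max_right f g)
  rw [h1] at h2; exact Option.some_inj.mp h2

-- a Collatz step from n ≥ 2 stays ≥ 1
theorem pvStep_pos {n : Int} (h : 2 ≤ n) : 1 ≤ pvStep n := by
  unfold pvStep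
  split
  · rw [PySem.Int.floordiv_eq_ediv_of_pos (by omega)]
    omega
  · omega

-- if the walk never drops below i > 1, the chain never reaches 1 within the same fuel
theorem walkBelow_none {f : Nat} {i n : Int} (hi : 1 < i)
    (h : walkBelow f i n = none) : chainLen f n = none := by
  induction f generalizing n with
  | zero =>
    unfold walkBelow at h
    split at h
    · simp at h
    · next hn =>
      have hn1 : n ≠ 1 := by omega
      unfold chainLen; simp [hn1]
  | succ f ih =>
    unfold walkBelow at h
    split at h
    · simp at h
    · next hn =>
      have hn1 : n ≠ 1 := by omega
      simp only [Option.map_eq_none_iff] at h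
      have := ih h
      unfold chainLen
      simp [hn1, this]

-- a successful walk from n ≥ 1: it lands on 1 ≤ m < i after s ≥ 0 steps, and the chain
-- length of n is exactly s more than the chain length of m (both directions, any fuel)
theorem walkBelow_some {f : Nat} {i n s m : Int} (hi : 1 < i) (hn : 1 ≤ n)
    (h : walkBelow f i n = some (s, m)) :
    0 ≤ s ∧ 1 ≤ m ∧ m < i ∧
    (∀ g w, chainLen g m = some w → chainLen (g + s.toNat) n = some (w + s)) ∧
    (∀ g v, chainLen g n = some v → ∃ w, chainLen g m = some w ∧ v = w + s) := by
  induction f generalizing n s m with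
  | zero =>
    unfold walkBelow at h
    split at h
    · next hlt =>
      simp only [Option.some_inj, Prod.mk.injEq] at h
      obtain ⟨rfl, rfl⟩ := h
      refine ⟨le_refl 0, hn, hlt, ?_, ?_⟩
      · intro g w hw; simpa using hw
      · intro g v hv; exact ⟨v, hv, by omega⟩
    · simp at h
  | succ f ih =>
    unfold walkBelow at h
    split at h
    · next hlt =>
      simp only [Option.some_inj, Prod.mk.injEq] at h
      obtain ⟨rfl, rfl⟩ := h
      refine ⟨le_refl 0, hn, hlt, ?_, ?_⟩
      · intro g w hw; simpa using hw
      · intro g v hv; exact ⟨v, hv, by omega⟩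
    · next hge =>
      simp only [Option.map_eq_some_iff] at h
      obtain ⟨⟨s', m'⟩, hw, hpair⟩ := h
      simp only [Prod.mk.injEq] at hpair
      obtain ⟨hs, hm⟩ := hpair
      subst hs; subst hm
      have hn2 : 2 ≤ n := by omega
      have hn1 : n ≠ 1 := by omega
      obtain ⟨hs0, hm1, hmi, hdir1, hdir2⟩ := ih (pvStep_pos hn2) hw
      have hto : (s' + 1).toNat = s'.toNat + 1 := by omega
      refine ⟨by omega, hm1, hmi, ?_, ?_⟩
      · intro g w hw'
        have h1 := hdir1 g w hw'
        rw [hto, ← Nat.add_assoc]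
        unfold chainLen
        rw [if_neg hn1]
        show (chainLen (g + s'.toNat) (pvStep n)).map (· + 1) = some (w + (s' + 1))
        rw [h1]
        show some (w + s' + 1) = some (w + (s' + 1))
        exact congrArg some (by omega)
      · intro g v hv
        obtain ⟨g', rfl⟩ : ∃ g', g = g' + 1 := by
          cases g with
          | zero => unfold chainLen at hv; simp [hn1] at hv
          | succ g' => exact ⟨g', rfl⟩
        have hv' : (chainLen g' (pvStep n)).map (· + 1) = some v := by
          unfold chainLen at hv; simpa [hn1] using hv
        simp only [Option.map_eq_some_iff] at hv'
        obtain ⟨v', hv'', rfl⟩ := hv'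
        obtain ⟨w, hwm, hweq⟩ := hdir2 g' v' hv''
        exact ⟨w, chainLen_mono hwm (by omega), by omega⟩

-- one iteration of the main loop: B's memoized size agrees with A's naive size, and the
-- cache invariant advances from i to i + 1
theorem step_spec {i : Int} {d : PySem.Dict Int Int} (hi : 2 ≤ i) (hInv : CacheInv i d) :
    (match lengthAt? i d with
     | some size => if size ≤ (pvFuel : Int) then some size else none
     | none => none) = chainLen pvFuel i ∧
    CacheInv (i + 1)
      (match lengthAt? i d with
       | some size => if size ≤ (pvFuel : Int) then d.insert i size else d
       | none => d) := by
  unfold lengthAt?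
  cases hwalk : walkBelow pvFuel i i with
  | none =>
    have hA : chainLen pvFuel i = none := walkBelow_none (by omega) hwalk
    refine ⟨by simp [hA], ?_⟩
    constructor
    · intro k v hk
      obtain ⟨h1, h2, h3⟩ := hInv.1 k v hk
      exact ⟨h1, by omega, h3⟩
    · intro k v hk1 hk2 hk3
      have hki : k ≠ i := fun e => by rw [e, hA] at hk3; simp at hk3
      exact hInv.2 k v hk1 (by omega) hk3
  | some p =>
    obtain ⟨s, m⟩ := p
    dsimp only
    obtain ⟨hs0, hm1, hmi, hdir1, hdir2⟩ := walkBelow_some (by omega) (by omega) hwalk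
    cases hget : d.get? m with
    | none =>
      -- m's fueled chain does not terminate, hence neither does i's
      have hmnone : chainLen pvFuel m = none := by
        cases hc : chainLen pvFuel m with
        | none => rfl
        | some w => rw [hInv.2 m w hm1 hmi hc] at hget; simp at hget
      have hA : chainLen pvFuel i = none := by
        cases hc : chainLen pvFuel i with
        | none => rfl
        | some v =>
          obtain ⟨w, hwm, _⟩ := hdir2 pvFuel v hc
          rw [hwm] at hmnone; simp at hmnone
      refine ⟨by simp [hA], ?_⟩
      constructor
      · intro k v hk
        obtain ⟨h1, h2, h3⟩ := hInv.1 k v hk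
        exact ⟨h1, by omega, h3⟩
      · intro k v hk1 hk2 hk3
        have hki : k ≠ i := fun e => by rw [e, hA] at hk3; simp at hk3
        exact hInv.2 k v hk1 (by omega) hk3
    | some w =>
      obtain ⟨hw1, _, hwchain⟩ := hInv.1 m w hget
      obtain ⟨hw0, _, hwmin⟩ := chainLen_min hwchain
      have hchain : chainLen (w.toNat + s.toNat) i = some (w + s) := hdir1 w.toNat w hwmin
      by_cases hle : s + w ≤ (pvFuel : Int)
      · have hA : chainLen pvFuel i = some (w + s) :=
          chainLen_mono hchain (by omega)
        have hsw : w + s = s + w := by omega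
        refine ⟨by simp [hA, hle, hsw], ?_⟩
        dsimp only
        rw [if_pos hle]
        constructor
        · intro k v hk
          rw [PySem.Dict.get?_insert] at hk
          split at hk
          · next hk' =>
            subst hk'
            have : v = s + w := Option.some_inj.mp hk.symm
            subst this
            exact ⟨by omega, by omega, by rw [hA, hsw]⟩
          · obtain ⟨h1, h2, h3⟩ := hInv.1 k v hk
            exact ⟨h1, by omega, h3⟩
        · intro k v hk1 hk2 hk3
          rw [PySem.Dict.get?_insert]
          split
          · next hk' =>
            subst hk'
            rw [hA] at hk3
            have : v = w + s := Option.some_inj.mp hk3.symm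
            subst this
            rw [hsw]
          · next hk' =>
            exact hInv.2 k v hk1 (by omega) hk3
      · -- the true length exceeds the fuel: A's fueled walk runs out too
        have hA : chainLen pvFuel i = none := by
          cases hc : chainLen pvFuel i with
          | none => rfl
          | some v =>
            obtain ⟨_, hvle, _⟩ := chainLen_min hc
            have := chainLen_unique hc hchain
            omega
        refine ⟨by simp [hA, hle], ?_⟩
        dsimp only
        rw [if_neg hle]
        constructor
        · intro k v hk
          obtain ⟨h1, h2, h3⟩ := hInv.1 k v hk
          exact ⟨h1, by omega, h3⟩
        · intro k v hk1 hk2 hk3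
          have hki : k ≠ i := fun e => by rw [e, hA] at hk3; simp at hk3
          exact hInv.2 k v hk1 (by omega) hk3

-- one B step equals one A step on the shared state, carrying the invariants along
theorem stepB_char {i : Int} {a : Int × Option Int} {d : PySem.Dict Int Int}
    (h2 : 2 ≤ i) (hInv : CacheInv i d) (ha : 0 ≤ a.1) :
    ∃ d', stepB (a, d) i = (stepA a i, d') ∧ CacheInv (i + 1) d' ∧ 0 ≤ (stepA a i).1 := by
  obtain ⟨hsize, hInv'⟩ := step_spec h2 hInv
  unfold stepA stepB
  cases hl : lengthAt? i d with
  | none =>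
    rw [hl] at hsize hInv'
    dsimp only at hsize hInv' ⊢
    rw [← hsize]
    simp only [Option.getD_none]
    rw [if_neg (by omega)]
    exact ⟨d, rfl, hInv', ha⟩
  | some size =>
    rw [hl] at hsize hInv'
    dsimp only at hsize hInv' ⊢
    by_cases hle : size ≤ (pvFuel : Int)
    · rw [if_pos hle] at hsize hInv' ⊢
      rw [← hsize]
      simp only [Option.getD_some]
      obtain ⟨h0, _, _⟩ := chainLen_min hsize.symm
      by_cases hgt : size > a.1
      · rw [if_pos hgt, if_pos hgt]
        exact ⟨d.insert i size, rfl, hInv', by dsimp only; omega⟩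
      · rw [if_neg hgt, if_neg hgt]
        exact ⟨d.insert i size, rfl, hInv', ha⟩
    · rw [if_neg hle] at hsize hInv' ⊢
      rw [← hsize]
      simp only [Option.getD_none]
      rw [if_neg (by omega)]
      exact ⟨d, rfl, hInv', ha⟩

-- the main loops agree, from any aligned state: A folds over [i, t), B over the same range
-- with its cache, provided the invariants hold at i
theorem loop_eq (t : Int) : ∀ (i : Int) (a : Int × Option Int) (d : PySem.Dict Int Int),
    2 ≤ i → CacheInv i d → 0 ≤ a.1 →
    ((PySem.List.pyRange i t 1).foldl stepA a) =
    ((PySem.List.pyRange i t 1).foldl stepB (a, d)).1 := by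
  intro i
  induction hi : (t - i).toNat using Nat.strong_induction_on generalizing i with
  | _ k ih =>
    intro a d h2 hInv ha
    by_cases hti : i < t
    · rw [PySem.List.pyRange_one_cons hti]
      simp only [List.foldl_cons]
      obtain ⟨d', hB, hInv', ha'⟩ := stepB_char h2 hInv ha
      rw [hB]
      have hk' : (t - (i + 1)).toNat < k := by omega
      exact ih _ hk' (i + 1) rfl (stepA a i) d' (by omega) hInv' ha'
    · have h1 : PySem.List.pyRange i t 1 = [] := by
        rw [PySem.List.pyRange_one]
        have : (t - i).toNat = 0 := by omega
        rw [this]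
        simp
      rw [h1]
      simp

theorem cacheInv_init : CacheInv 2 ((PySem.Dict.empty).insert 1 0) := by
  constructor
  · intro k v hk
    by_cases hk1 : k = 1
    · subst hk1
      rw [PySem.Dict.get?_insert_self] at hk
      have hv0 : v = 0 := (Option.some_inj.mp hk).symm
      subst hv0
      exact ⟨le_refl 1, by omega, rfl⟩
    · rw [PySem.Dict.get?_insert_of_ne _ _ hk1] at hk
      simp [PySem.Dict.get?_empty] at hk
  · intro k v hk1 hk2 hk3
    have hk' : k = 1 := by omega
    subst hk'
    have : chainLen pvFuel 1 = some 0 := rfl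
    rw [this] at hk3
    have hv0 : v = 0 := (Option.some_inj.mp hk3).symm
    subst hv0
    exact PySem.Dict.get?_insert_self _ _ _

-- ===== VERDICT (by name: the statement is the Claim_ definition above) =====
theorem largest_chain_spec : Claim_equal_largest_chain := by
  intro threshold _ hpre
  unfold Pre_largest_chain at hpre
  unfold Spec_largest_chain largest_chain largest_chain_alt
  have hsplit : PySem.List.pyRange 1 threshold 1 = 1 :: PySem.List.pyRange 2 threshold 1 := by
    have := PySem.List.pyRange_one_cons (a := 1) (b := threshold) (by omega)
    simpa using this
  rw [hsplit]
  simp only [List.foldl_cons]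
  have h1 : stepA (0, none) 1 = (0, none) := by
    unfold stepA
    have : chainLen pvFuel 1 = some 0 := rfl
    rw [this]
    simp
  rw [h1]
  rw [loop_eq threshold 2 (0, none) _ (le_refl 2) cacheInv_init (le_refl 0)]
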